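-- pv_equiv track=rewrite | github.com/pagatpatn/LiveChat | main.py | clean_single_line
-- ===== SOURCE A (Python) =====
-- def clean_single_line(msg: str) -> str:
--     flat = " ".join(msg.replace("\n", " ").replace("\r", " ").split())
--     fixed_words = []
--     for word in flat.split():
--         if len(word) > 30:
--             chunks = [word[i:i+30] for i in range(0, len(word), 30)]
--             fixed_words.append("\u200B".join(chunks))
--         else:
--             fixed_words.append(word)
--     return " ".join(fixed_words)
-- ===== SOURCE B (Python) =====
-- def clean_single_line(msg: str) -> str:
--     # single left-to-right scan: collapse whitespace runs to one space and
--     # insert a zero-width space after every 30 consecutive non-space chars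
--     out = []
--     run = 0
--     for ch in msg:
--         if ch in " \t\n\r":
--             run = 0
--         else:
--             if run == 0 and out:
--                 out.append(" ")
--             elif run > 0 and run % 30 == 0:
--                 out.append("\u200B")
--             out.append(ch)
--             run += 1
--     return "".join(out)
-- ===== Notes on version B (the rewrite author's own statement) =====
-- stated objective: alternative
-- what changed: A normalises whitespace via replace/split/join and then re-splits into words, slicing each long word into 30-char chunks rejoined with zero-width spaces; B makes a single left-to-right character scan with a run-length counter, emitting one separating space per whitespace run and a zero-width space after every 30 consecutive non-space characters.
import Mathlib
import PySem

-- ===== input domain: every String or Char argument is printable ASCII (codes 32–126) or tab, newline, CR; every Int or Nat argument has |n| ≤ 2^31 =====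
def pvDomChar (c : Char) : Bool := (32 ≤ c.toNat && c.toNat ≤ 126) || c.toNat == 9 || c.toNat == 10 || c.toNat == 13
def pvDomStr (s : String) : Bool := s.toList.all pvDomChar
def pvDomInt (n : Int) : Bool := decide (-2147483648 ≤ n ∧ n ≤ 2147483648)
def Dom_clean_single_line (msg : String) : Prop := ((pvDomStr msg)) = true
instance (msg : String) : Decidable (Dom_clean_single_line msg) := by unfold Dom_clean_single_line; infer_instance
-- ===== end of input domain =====

-- B replaces A's split-into-words + per-word chunk-slicing loops by a single
-- left-to-right character scan with a run-length counter (objective: alternative).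

-- ===== PORT A =====
def clean_single_line (msg : String) : String :=
  let flat := PySem.Str.join " "
    (PySem.Str.split₀ (PySem.Str.replace (PySem.Str.replace msg "\n" " ") "\r" " "))
  let fixed_words := (PySem.Str.split₀ flat).foldl (fun acc word =>
    if PySem.Str.len word > 30 then
      let chunks := (PySem.List.pyRange 0 (PySem.Str.len word) 30).map
        (fun i => PySem.Str.slice word (some i) (some (i + 30)))
      acc ++ [PySem.Str.join "\u200B" chunks]
    else acc ++ [word]) []
  PySem.Str.join " " fixed_words

-- ===== PORT B =====
def clean_single_line_alt (msg : String) : String :=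
  String.ofList
    ((msg.toList.foldl (fun (st : List Char × Nat) ch =>
        if ch = ' ' ∨ ch = '\t' ∨ ch = '\n' ∨ ch = '\r' then (st.1, 0)
        else
          (((if st.2 = 0 ∧ st.1 ≠ [] then st.1 ++ [' ']
             else if 0 < st.2 ∧ st.2 % 30 = 0 then st.1 ++ ['\u200B']
             else st.1) ++ [ch]), st.2 + 1))
      ([], 0)).1)

-- ===== PRECONDITION & SPEC =====
def Spec_clean_single_line (msg : String) (out : String) : Prop := out = clean_single_line_alt msg
instance (msg : String) (out : String) : Decidable (Spec_clean_single_line msg out) := by unfold Spec_clean_single_line; infer_instance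

-- ===== CLAIM (what is proved, stated in full; the proofs are below) =====
def Claim_equal_clean_single_line : Prop := ∀ (msg : String), Dom_clean_single_line msg → Spec_clean_single_line msg (clean_single_line msg)

-- ===== LEMMAS AND PROOFS =====

-- word rendered with a zero-width space before every position k with 0 < k, k % 30 = 0
def zwsAux (k : Nat) : List Char → List Char
  | [] => []
  | c :: cs => (if 0 < k ∧ k % 30 = 0 then ['\u200B'] else []) ++ c :: zwsAux (k + 1) cs

def renderWords (ws : List (List Char)) : List Char :=
  PySem.Chars.join [' '] (ws.map (zwsAux 0))

def goodWord (w : List Char) : Prop := w ≠ [] ∧ ∀ c ∈ w, PySem.Chars.isspace c = false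

def emit (ws : List (List Char)) (cur : List Char) : List Char :=
  renderWords ws ++ (if ws ≠ [] ∧ cur ≠ [] then [' '] else []) ++ zwsAux 0 cur

theorem zwsAux_append (u v : List Char) (k : Nat) :
    zwsAux k (u ++ v) = zwsAux k u ++ zwsAux (k + u.length) v := by
  induction u generalizing k with
  | nil => simp [zwsAux]
  | cons c cs ih => simp [zwsAux, ih (k + 1)]; ring_nf
  -- ring_nf to align (k+1)+cs.length with k+(cs.length+1)

theorem zwsAux_id (w : List Char) (k : Nat)
    (h : ∀ i, i < w.length → ¬(0 < k + i ∧ (k + i) % 30 = 0)) : zwsAux k w = w := by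
  induction w generalizing k with
  | nil => rfl
  | cons c cs ih =>
    have h0 : ¬(0 < k ∧ k % 30 = 0) := by have := h 0 (by simp); simpa using this
    simp [zwsAux, h0]
    exact ih (k + 1) (fun i hi => by have := h (i + 1) (by simpa using Nat.succ_lt_succ hi); omega)

theorem zwsAux_short (w : List Char) (h : w.length ≤ 30) : zwsAux 0 w = w :=
  zwsAux_id w 0 (fun i hi => by omega)

theorem zwsAux_shift (w : List Char) (k : Nat) (hk : 0 < k) :
    zwsAux (k + 30) w = zwsAux k w := by
  induction w generalizing k with
  | nil => rfl
  | cons c cs ih =>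
    have hiff : (0 < k + 30 ∧ (k + 30) % 30 = 0) ↔ (0 < k ∧ k % 30 = 0) := by omega
    simp only [zwsAux]
    rw [if_congr hiff rfl rfl]
    have := ih (k + 1) (by omega)
    simpa using this

theorem zwsAux_30 (d : List Char) (hd : d ≠ []) :
    zwsAux 30 d = '\u200B' :: zwsAux 0 d := by
  cases d with
  | nil => exact absurd rfl hd
  | cons c cs =>
    simp [zwsAux]
    have : (30 : Nat) + 1 = 1 + 30 := by omega
    rw [show (31 : Nat) = 1 + 30 from rfl, zwsAux_shift cs 1 (by omega)]

theorem zwsAux_chunk (w : List Char) (h : 30 < w.length) :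
    zwsAux 0 w = w.take 30 ++ '\u200B' :: zwsAux 0 (w.drop 30) := by
  conv_lhs => rw [← List.take_append_drop 30 w]
  rw [zwsAux_append]
  have hlen : (w.take 30).length = 30 := by simp; omega
  rw [hlen, zwsAux_short _ (by omega), zwsAux_30 _ (by
    intro hnil
    have := congrArg List.length hnil
    simp at this; omega)]

theorem zwsAux_snoc (w : List Char) (c : Char) :
    zwsAux 0 (w ++ [c]) = zwsAux 0 w ++
      ((if 0 < w.length ∧ w.length % 30 = 0 then ['\u200B'] else []) ++ [c]) := by
  rw [zwsAux_append]
  simp [zwsAux]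

theorem chunk_join (m : Nat) : ∀ (w : List Char), 30 * m < w.length → w.length ≤ 30 * m + 30 →
    PySem.Chars.join ['\u200B'] ((List.range (m + 1)).map (fun k => (w.drop (30 * k)).take 30))
      = zwsAux 0 w := by
  induction m with
  | zero =>
    intro w h1 h2
    simp [PySem.Chars.join_singleton, List.range_succ]
    rw [List.take_of_length_le (by omega)]
    exact (zwsAux_short w (by omega)).symm
  | succ m ih =>
    intro w h1 h2
    rw [List.range_succ_eq_map]
    simp only [List.map_cons, List.map_map]
    have hstep : ((fun k => (w.drop (30 * k)).take 30) ∘ Nat.succ)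
        = (fun k => ((w.drop 30).drop (30 * k)).take 30) := by
      funext k
      simp only [Function.comp]
      rw [List.drop_drop]; congr 2; simp [Nat.succ_eq_add_one]; ring
    rw [hstep]
    have hih := ih (w.drop 30) (by simp; omega) (by simp; omega)
    cases hr : (List.range (m + 1)).map (fun k => ((w.drop 30).drop (30 * k)).take 30) with
    | nil => simp at hr
    | cons b rest =>
      rw [PySem.Chars.join_cons_cons]
      rw [hr] at hih
      rw [hih, zwsAux_chunk w (by omega)]
      simp


theorem replace_go_single (x y : Char) : ∀ (fuel : Nat) (l acc : List Char), l.length ≤ fuel →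
    PySem.Chars.replace.go [x] [y] fuel l acc
      = acc.reverse ++ l.map (fun c => if c = x then y else c) := by
  intro fuel
  induction fuel with
  | zero =>
    intro l acc h
    have : l = [] := by cases l <;> simp_all
    subst this; simp [PySem.Chars.replace.go]
  | succ fuel ih =>
    intro l acc h
    cases l with
    | nil => simp [PySem.Chars.replace.go]
    | cons c t =>
      by_cases hc : c = x
      · subst hc
        have hpre : [c].isPrefixOf (c :: t) = true := by simp [List.isPrefixOf]
        simp only [PySem.Chars.replace.go, hpre, if_pos]
        rw [ih _ _ (by simpa using Nat.le_of_succ_le_succ h)]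
        simp
      · have hpre : [x].isPrefixOf (c :: t) = false := by
          simp [List.isPrefixOf]; exact fun h' => absurd h'.symm hc
        simp only [PySem.Chars.replace.go, hpre]
        rw [if_neg (by simp), ih _ _ (by simpa using Nat.le_of_succ_le_succ h)]
        simp [hc]

theorem replace_single (s : List Char) (x y : Char) :
    PySem.Chars.replace s [x] [y] = s.map (fun c => if c = x then y else c) := by
  have h := replace_go_single x y s.length s [] le_rfl
  simpa [PySem.Chars.replace] using h

theorem split0_go_map (f : Char → Char)
    (hf : ∀ c, PySem.Chars.isspace (f c) = PySem.Chars.isspace c ∧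
      (PySem.Chars.isspace c = false → f c = c)) :
    ∀ (l cur acc : _), PySem.Chars.split₀.go (l.map f) cur acc = PySem.Chars.split₀.go l cur acc := by
  intro l
  induction l with
  | nil => intro cur acc; rfl
  | cons c rest ih =>
    intro cur acc
    simp only [List.map_cons, PySem.Chars.split₀.go, (hf c).1]
    by_cases hs : PySem.Chars.isspace c = true
    · simp only [hs, if_true]
      by_cases hce : cur.isEmpty = true
      · rw [if_pos hce, if_pos hce]; exact ih _ _
      · rw [if_neg hce, if_neg hce]; exact ih _ _
    · have hs' : PySem.Chars.isspace c = false := by simpa using hs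
      simp only [hs', Bool.false_eq_true, if_false]
      rw [(hf c).2 hs']
      exact ih _ _

theorem split0_map (f : Char → Char)
    (hf : ∀ c, PySem.Chars.isspace (f c) = PySem.Chars.isspace c ∧
      (PySem.Chars.isspace c = false → f c = c)) (s : List Char) :
    PySem.Chars.split₀ (s.map f) = PySem.Chars.split₀ s :=
  split0_go_map f hf s [] []

theorem split0_go_good : ∀ (l cur acc : _),
    (∀ w ∈ acc, goodWord w) → (∀ c ∈ cur, PySem.Chars.isspace c = false) →
    ∀ w ∈ PySem.Chars.split₀.go l cur acc, goodWord w := by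
  intro l
  induction l with
  | nil =>
    intro cur acc hacc hcur w hw
    simp only [PySem.Chars.split₀.go] at hw
    by_cases hc : cur = []
    · rw [if_pos (by simp [hc])] at hw
      exact hacc _ (List.mem_reverse.mp hw)
    · rw [if_neg (by simp [List.isEmpty_iff, hc])] at hw
      rw [List.reverse_cons] at hw
      rcases List.mem_append.mp hw with h | h
      · exact hacc _ (List.mem_reverse.mp h)
      · have : w = cur.reverse := by simpa using h
        subst this
        exact ⟨by simpa using hc, fun c hc' => hcur c (List.mem_reverse.mp hc')⟩
  | cons c rest ih =>
    intro cur acc hacc hcur w hw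
    by_cases hs : PySem.Chars.isspace c = true
    · simp only [PySem.Chars.split₀.go, hs, if_true] at hw
      by_cases hc : cur = []
      · subst hc
        rw [if_pos (by simp)] at hw
        exact ih [] acc hacc (by simp) w hw
      · rw [if_neg (by simp [List.isEmpty_iff, hc])] at hw
        refine ih [] _ ?_ (by simp) w hw
        intro u hu
        rcases List.mem_cons.mp hu with h | h
        · subst h
          exact ⟨by simpa using hc, fun d hd => hcur d (List.mem_reverse.mp hd)⟩
        · exact hacc _ h
    · have hs' : PySem.Chars.isspace c = false := by simpa using hs
      simp only [PySem.Chars.split₀.go, hs', Bool.false_eq_true, if_false] at hw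
      refine ih (c :: cur) acc hacc ?_ w hw
      intro d hd
      rcases List.mem_cons.mp hd with h | h
      · subst h; exact hs'
      · exact hcur d h

theorem split0_good (s : List Char) : ∀ w ∈ PySem.Chars.split₀ s, goodWord w :=
  split0_go_good s [] [] (by simp) (by simp)

theorem split0_go_word : ∀ (w : List Char), (∀ c ∈ w, PySem.Chars.isspace c = false) →
    ∀ (t cur acc : _), PySem.Chars.split₀.go (w ++ t) cur acc
      = PySem.Chars.split₀.go t (w.reverse ++ cur) acc := by
  intro w
  induction w with
  | nil => intro _ t cur acc; simp
  | cons c cs ih =>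
    intro hw t cur acc
    have hs : PySem.Chars.isspace c = false := hw c (by simp)
    simp only [List.cons_append, PySem.Chars.split₀.go, hs, Bool.false_eq_true, if_false]
    rw [ih (fun d hd => hw d (by simp [hd])) t (c :: cur) acc]
    simp

theorem split0_join : ∀ (ws acc : List (List Char)),
    (∀ w ∈ ws, goodWord w) →
    PySem.Chars.split₀.go (PySem.Chars.join [' '] ws) [] acc = acc.reverse ++ ws := by
  intro ws
  induction ws with
  | nil => intro acc _; simp [PySem.Chars.join_nil, PySem.Chars.split₀.go]
  | cons w rest ih =>
    intro acc hg
    have hw : goodWord w := hg w (by simp)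
    cases rest with
    | nil =>
      rw [PySem.Chars.join_singleton]
      rw [show w = w ++ ([] : List Char) by simp, split0_go_word w hw.2 [] [] acc]
      simp only [PySem.Chars.split₀.go]
      rw [if_neg (by simp [List.isEmpty_iff]; simpa using hw.1)]
      simp
    | cons v vs =>
      rw [PySem.Chars.join_cons_cons]
      rw [List.append_assoc, split0_go_word w hw.2 _ [] acc]
      have hsp : PySem.Chars.isspace ' ' = true := by decide
      simp only [List.cons_append, List.nil_append, PySem.Chars.split₀.go, hsp, if_pos]
      rw [if_neg (by simp [List.isEmpty_iff]; simpa using hw.1)]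
      have := ih (w :: acc) (fun u hu => hg u (by simp [hu]))
      simp only [List.append_nil, List.reverse_reverse] at this ⊢
      rw [this]
      simp

theorem render_snoc (ws : List (List Char)) (w : List Char) :
    renderWords (ws ++ [w])
      = renderWords ws ++ (if ws = [] then [] else [' ']) ++ zwsAux 0 w := by
  induction ws with
  | nil => simp [renderWords, PySem.Chars.join_singleton, PySem.Chars.join_nil]
  | cons a rest ih =>
    cases rest with
    | nil =>
      simp [renderWords, PySem.Chars.join_cons_cons, PySem.Chars.join_singleton]
    | cons b bs =>
      simp only [renderWords, List.cons_append, List.map_cons] at ih ⊢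
      rw [PySem.Chars.join_cons_cons]
      have ih' := ih
      simp only [List.map_append, List.map_cons, List.map_nil] at ih'
      cases bs <;>
        simp_all [PySem.Chars.join_cons_cons, List.append_assoc]

theorem zwsAux_ne_nil (w : List Char) (h : w ≠ []) (k : Nat) : zwsAux k w ≠ [] := by
  cases w with
  | nil => exact absurd rfl h
  | cons c cs =>
    simp only [zwsAux]
    intro hh
    rcases List.append_eq_nil_iff.mp hh with ⟨_, h2⟩
    exact List.cons_ne_nil _ _ h2

theorem render_ne_nil (ws : List (List Char)) (h : ws ≠ [])
    (hg : ∀ w ∈ ws, goodWord w) : renderWords ws ≠ [] := by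
  cases ws with
  | nil => exact absurd rfl h
  | cons a rest =>
    have ha : a ≠ [] := (hg a (by simp)).1
    cases rest with
    | nil =>
      simp [renderWords, PySem.Chars.join_singleton]
      exact zwsAux_ne_nil a ha 0
    | cons b bs =>
      simp only [renderWords, List.map_cons]
      rw [PySem.Chars.join_cons_cons]
      intro hh
      rcases List.append_eq_nil_iff.mp hh with ⟨h1, _⟩
      rcases List.append_eq_nil_iff.mp h1 with ⟨h2, _⟩
      exact zwsAux_ne_nil a ha 0 h2

theorem emit_nil (ws : List (List Char)) : emit ws [] = renderWords ws := by
  simp [emit, zwsAux]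

theorem emit_snoc (ws : List (List Char)) (w : List Char) (hw : w ≠ []) :
    emit ws w = renderWords (ws ++ [w]) := by
  rw [render_snoc, emit]
  by_cases hws : ws = [] <;> simp [hws, hw]

def stepB (st : List Char × Nat) (ch : Char) : List Char × Nat :=
  if ch = ' ' ∨ ch = '\t' ∨ ch = '\n' ∨ ch = '\r' then (st.1, 0)
  else
    (((if st.2 = 0 ∧ st.1 ≠ [] then st.1 ++ [' ']
       else if 0 < st.2 ∧ st.2 % 30 = 0 then st.1 ++ ['\u200B']
       else st.1) ++ [ch]), st.2 + 1)

theorem char_of_toNat {c d : Char} (h : c.toNat = d.toNat) : c = d :=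
  Char.ext (UInt32.toNat_inj.mp h)

theorem isspace_dom (c : Char) (h : pvDomChar c = true) :
    (c = ' ' ∨ c = '\t' ∨ c = '\n' ∨ c = '\r') ↔ PySem.Chars.isspace c = true := by
  constructor
  · rintro (rfl | rfl | rfl | rfl) <;> decide
  · intro hs
    simp [pvDomChar] at h
    simp [PySem.Chars.isspace] at hs
    have h9 : c.toNat = 32 ∨ c.toNat = 9 ∨ c.toNat = 10 ∨ c.toNat = 13 := by omega
    rcases h9 with h' | h' | h' | h'
    · exact Or.inl (char_of_toNat (h'.trans (by decide)))
    · exact Or.inr (Or.inl (char_of_toNat (h'.trans (by decide))))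
    · exact Or.inr (Or.inr (Or.inl (char_of_toNat (h'.trans (by decide)))))
    · exact Or.inr (Or.inr (Or.inr (char_of_toNat (h'.trans (by decide)))))

theorem emit_push (ws : List (List Char)) (w : List Char) (c : Char)
    (hg : ∀ u ∈ ws, goodWord u) :
    (if w.length = 0 ∧ emit ws w ≠ [] then emit ws w ++ [' ']
     else if 0 < w.length ∧ w.length % 30 = 0 then emit ws w ++ ['\u200B']
     else emit ws w) ++ [c] = emit ws (w ++ [c]) := by
  cases w with
  | nil =>
    rw [emit_nil]
    by_cases hws : ws = []
    · subst hws
      simp [renderWords, PySem.Chars.join_nil, emit, zwsAux]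
    · rw [if_pos ⟨rfl, render_ne_nil ws hws hg⟩]
      simp [emit, hws, zwsAux]
  | cons d ds =>
    rw [if_neg (by simp)]
    simp only [emit, zwsAux_snoc]
    by_cases hfire : (ds.length + 1) % 30 = 0 <;>
      simp [hfire, List.append_assoc]

theorem B_go : ∀ (cs cur : List Char) (acc : List (List Char)),
    (∀ c ∈ cs, pvDomChar c = true) →
    (∀ w ∈ acc, goodWord w) → (∀ c ∈ cur, PySem.Chars.isspace c = false) →
    (cs.foldl stepB (emit acc.reverse cur.reverse, cur.length)).1
      = renderWords (PySem.Chars.split₀.go cs cur acc) := by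
  intro cs
  induction cs with
  | nil =>
    intro cur acc _ hacc hcur
    simp only [List.foldl_nil]
    cases hc : cur with
    | nil => simp [PySem.Chars.split₀.go, emit_nil]
    | cons d ds =>
      simp only [PySem.Chars.split₀.go]
      rw [if_neg (by simp)]
      rw [emit_snoc _ _ (by simp)]
      simp
  | cons c rest ih =>
    intro cur acc hdom hacc hcur
    have hdc : pvDomChar c = true := hdom c (by simp)
    have hdr : ∀ d ∈ rest, pvDomChar d = true := fun d hd => hdom d (by simp [hd])
    simp only [List.foldl_cons]
    by_cases hs : c = ' ' ∨ c = '\t' ∨ c = '\n' ∨ c = '\r'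
    · have hsp : PySem.Chars.isspace c = true := (isspace_dom c hdc).mp hs
      rw [show stepB (emit acc.reverse cur.reverse, cur.length) c
            = (emit acc.reverse cur.reverse, 0) by simp [stepB, hs]]
      simp only [PySem.Chars.split₀.go, hsp, if_pos]
      cases hc : cur with
      | nil =>
        rw [if_pos (by simp)]
        exact ih [] acc hdr hacc (by simp)
      | cons d ds =>
        rw [if_neg (by simp)]
        have hgood : ∀ u ∈ cur.reverse :: acc, goodWord u := by
          intro u hu
          rcases List.mem_cons.mp hu with h | h
          · subst h
            exact ⟨by simp [hc], fun e he => hcur e (List.mem_reverse.mp he)⟩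
          · exact hacc u h
        have hrec := ih [] (cur.reverse :: acc) hdr hgood (by simp)
        have hemit : emit acc.reverse cur.reverse
            = emit (cur.reverse :: acc).reverse (([] : List Char)).reverse := by
          rw [emit_snoc _ _ (by simp [hc])]
          rw [List.reverse_cons, List.reverse_nil, emit_nil]
        rw [← hc, hemit]
        exact hrec
    · have hsp : PySem.Chars.isspace c = false := by
        rcases Bool.eq_false_or_eq_true (PySem.Chars.isspace c) with h | h
        · exact absurd ((isspace_dom c hdc).mpr h) hs
        · exact h
      rw [show stepB (emit acc.reverse cur.reverse, cur.length) c
            = (emit acc.reverse ((c :: cur).reverse), (c :: cur).length) by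
          simp only [stepB, hs, if_false]
          rw [show cur.length = cur.reverse.length by simp]
          rw [emit_push _ _ c (fun u hu => hacc u (List.mem_reverse.mp hu))]
          simp]
      simp only [PySem.Chars.split₀.go, hsp, Bool.false_eq_true, if_false]
      exact ih (c :: cur) acc hdr hacc
        (fun d hd => by
          rcases List.mem_cons.mp hd with h | h
          · subst h; exact hsp
          · exact hcur d h)

theorem wordFix (w : String) :
    (if PySem.Str.len w > 30 then
       PySem.Str.join "\u200B" ((PySem.List.pyRange 0 (PySem.Str.len w) 30).map
         (fun i => PySem.Str.slice w (some i) (some (i + 30))))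
     else w).toList = zwsAux 0 w.toList := by
  by_cases hlen : PySem.Str.len w > 30
  · rw [if_pos hlen]
    have hn30 : 30 < w.toList.length := by
      rw [PySem.Str.len_eq] at hlen; exact_mod_cast hlen
    rw [PySem.Str.toList_join]
    rw [show ("\u200B" : String).toList = ['\u200B'] from by decide]
    rw [PySem.Str.len_eq, PySem.List.pyRange_of_pos 0 (w.toList.length : Int) (by norm_num)]
    have hcount : (if (0:Int) < (w.toList.length : Int)
        then ((((w.toList.length : Int)) - 0 + 30 - 1) / 30).toNat else 0)
        = (w.toList.length - 1) / 30 + 1 := by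
      rw [if_pos (by exact_mod_cast Nat.lt_of_lt_of_le (by norm_num) (le_of_lt hn30))]
      omega
    rw [hcount]
    have hmap : List.map String.toList
          (List.map (fun i => PySem.Str.slice w (some i) (some (i + 30)))
            (List.map (fun k : Nat => (0 : Int) + 30 * (k : Int))
              (List.range ((w.toList.length - 1) / 30 + 1))))
        = (List.range ((w.toList.length - 1) / 30 + 1)).map
            (fun k => (w.toList.drop (30 * k)).take 30) := by
      simp only [List.map_map]
      apply List.map_congr_left
      intro k _
      simp only [Function.comp]
      rw [PySem.Str.toList_slice, PySem.Chars.slice_eq_listSlice]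
      rw [show (0 : Int) + 30 * (k : Int) = ((30 * k : Nat) : Int) from by push_cast; ring]
      rw [show ((30 * k : Nat) : Int) + 30 = ((30 * k : Nat) : Int) + ((30 : Nat) : Int) from by
        norm_num]
      rw [PySem.List.slice_natCast_add]
    rw [hmap]
    exact chunk_join _ w.toList (by omega) (by omega)
  · rw [if_neg hlen]
    rw [PySem.Str.len_eq] at hlen
    exact (zwsAux_short _ (by omega)).symm

theorem A_toList (msg : String) :
    (clean_single_line msg).toList = renderWords (PySem.Chars.split₀ msg.toList) := by
  unfold clean_single_line
  show (PySem.Str.join " "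
      ((PySem.Str.split₀ (PySem.Str.join " " (PySem.Str.split₀
          (PySem.Str.replace (PySem.Str.replace msg "\n" " ") "\r" " ")))).foldl
        (fun acc word =>
          if PySem.Str.len word > 30 then
            acc ++ [PySem.Str.join "\u200B" ((PySem.List.pyRange 0 (PySem.Str.len word) 30).map
              (fun i => PySem.Str.slice word (some i) (some (i + 30))))]
          else acc ++ [word]) [])).toList
    = renderWords (PySem.Chars.split₀ msg.toList)
  have hf : ∀ c : Char,
      PySem.Chars.isspace ((fun c => if c = '\r' then ' ' else c)
        ((fun c => if c = '\n' then ' ' else c) c)) = PySem.Chars.isspace c ∧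
      (PySem.Chars.isspace c = false →
        ((fun c => if c = '\r' then ' ' else c)
          ((fun c => if c = '\n' then ' ' else c) c)) = c) := by
    intro c
    by_cases h1 : c = '\n'
    · subst h1
      refine ⟨by decide, fun habs => absurd habs (by decide)⟩
    · by_cases h2 : c = '\r'
      · subst h2
        refine ⟨by decide, fun habs => absurd habs (by decide)⟩
      · simp [h1, h2]
  have hr2 : (PySem.Str.replace (PySem.Str.replace msg "\n" " ") "\r" " ").toList
      = (msg.toList.map (fun c => if c = '\n' then ' ' else c)).map
          (fun c => if c = '\r' then ' ' else c) := by
    rw [PySem.Str.toList_replace, PySem.Str.toList_replace]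
    rw [show ("\n" : String).toList = ['\n'] from by decide,
        show ("\r" : String).toList = ['\r'] from by decide,
        show (" " : String).toList = [' '] from by decide]
    rw [replace_single, replace_single]
  have hws : PySem.Chars.split₀
        ((PySem.Str.replace (PySem.Str.replace msg "\n" " ") "\r" " ").toList)
      = PySem.Chars.split₀ msg.toList := by
    rw [hr2, List.map_map]
    exact split0_map _ hf msg.toList
  have hgood := split0_good msg.toList
  have hflat : (PySem.Str.join " "
        (PySem.Str.split₀ (PySem.Str.replace (PySem.Str.replace msg "\n" " ") "\r" " "))).toList
      = PySem.Chars.join [' '] (PySem.Chars.split₀ msg.toList) := by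
    rw [PySem.Str.toList_join, PySem.Str.split₀_map_toList, hws]
    rfl
  have hsplit2 : (PySem.Str.split₀ (PySem.Str.join " "
        (PySem.Str.split₀ (PySem.Str.replace (PySem.Str.replace msg "\n" " ") "\r" " ")))).map
          String.toList
      = PySem.Chars.split₀ msg.toList := by
    rw [PySem.Str.split₀_map_toList, hflat]
    exact split0_join _ [] hgood
  have hfold : ∀ (ws : List String),
      ws.foldl (fun acc word =>
        if PySem.Str.len word > 30 then
          acc ++ [PySem.Str.join "\u200B" ((PySem.List.pyRange 0 (PySem.Str.len word) 30).map
            (fun i => PySem.Str.slice word (some i) (some (i + 30))))]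
        else acc ++ [word]) []
      = ws.map (fun word =>
          if PySem.Str.len word > 30 then
            PySem.Str.join "\u200B" ((PySem.List.pyRange 0 (PySem.Str.len word) 30).map
              (fun i => PySem.Str.slice word (some i) (some (i + 30))))
          else word) := by
    intro ws
    rw [show (fun (acc : List String) word =>
        if PySem.Str.len word > 30 then
          acc ++ [PySem.Str.join "\u200B" ((PySem.List.pyRange 0 (PySem.Str.len word) 30).map
            (fun i => PySem.Str.slice word (some i) (some (i + 30))))]
        else acc ++ [word])
      = (fun (acc : List String) word => acc ++ [if PySem.Str.len word > 30 then
          PySem.Str.join "\u200B" ((PySem.List.pyRange 0 (PySem.Str.len word) 30).map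
            (fun i => PySem.Str.slice word (some i) (some (i + 30))))
          else word]) from by funext acc word; split <;> rfl]
    rw [PySem.List.foldl_append_singleton_eq_map]
    rfl
  rw [hfold]
  rw [PySem.Str.toList_join]
  rw [show (" " : String).toList = [' '] from by decide]
  rw [List.map_map]
  have hcongr : ∀ l : List String,
      l.map (String.toList ∘ (fun word =>
        if PySem.Str.len word > 30 then
          PySem.Str.join "\u200B" ((PySem.List.pyRange 0 (PySem.Str.len word) 30).map
            (fun i => PySem.Str.slice word (some i) (some (i + 30))))
        else word))
      = (l.map String.toList).map (zwsAux 0) := by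
    intro l
    rw [List.map_map]
    apply List.map_congr_left
    intro w _
    simp only [Function.comp]
    exact wordFix w
  rw [hcongr, hsplit2]
  rfl

theorem B_toList (msg : String) (h : Dom_clean_single_line msg) :
    (clean_single_line_alt msg).toList = renderWords (PySem.Chars.split₀ msg.toList) := by
  have hdom : ∀ c ∈ msg.toList, pvDomChar c = true := by
    unfold Dom_clean_single_line pvDomStr at h
    simpa [List.all_eq_true] using h
  have hb : clean_single_line_alt msg
      = String.ofList ((msg.toList.foldl stepB ([], 0)).1) := rfl
  rw [hb, String.toList_ofList]
  rw [show (([] : List Char), (0 : Nat))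
      = (emit ([] : List (List Char)).reverse ([] : List Char).reverse,
         ([] : List Char).length) from by
    simp [emit_nil, renderWords, PySem.Chars.join_nil]]
  exact B_go msg.toList [] [] hdom (by simp) (by simp)

-- ===== VERDICT (by name: the statement is the Claim_ definition above) =====
theorem clean_single_line_spec : Claim_equal_clean_single_line := by
  intro msg hdom
  unfold Spec_clean_single_line
  apply String.toList_inj.mp
  rw [A_toList msg, B_toList msg hdom]
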